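-- pv_equiv track=rewrite | github.com/marha-hwang/coding-challenges | Python3/프로그래머스/1/42840. 모의고사/모의고사.py | solution
-- ===== SOURCE A (Python) =====
-- def solution(answers) :
--     student1 = [1, 2, 3, 4, 5]
--     student2 = [2, 1, 2, 3, 2, 4, 2, 5]
--     student3 = [3, 3, 1, 1, 2, 2, 4, 4, 5, 5]
--
--     correct1 = 0
--     correct2 = 0
--     correct3 = 0
--     for i in range(0, len(answers)) :
--         if student1[int(i%len(student1))] == answers[i] : correct1 += 1
--         if student2[int(i%len(student2))] == answers[i] : correct2 += 1
--         if student3[int(i%len(student3))] == answers[i] : correct3 += 1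
--
--     result = []
--     maxScore = max(max(correct1, correct2), correct3)
--     if correct1 == maxScore : result.append(1)
--     if correct2 == maxScore : result.append(2)
--     if correct3 == maxScore : result.append(3)
--
--     return result
-- ===== SOURCE B (Python) =====
-- def solution(answers):
--     # All three cyclic patterns repeat with period 40 = lcm(5, 8, 10), so a student's
--     # score depends only on the histogram of (position mod 40, answer) pairs.
--     # Pass 1: build that histogram; pass 2: read each student's score off the table
--     # without ever comparing answers to patterns element by element.
--     PERIOD = 40
--     freq = {}
--     for i, a in enumerate(answers):
--         key = (i % PERIOD, a)
--         freq[key] = freq.get(key, 0) + 1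
--     patterns = [[1, 2, 3, 4, 5],
--                 [2, 1, 2, 3, 2, 4, 2, 5],
--                 [3, 3, 1, 1, 2, 2, 4, 4, 5, 5]]
--     scores = [sum(freq.get((r, pat[r % len(pat)]), 0) for r in range(PERIOD))
--               for pat in patterns]
--     best = max(scores)
--     return [j + 1 for j in range(len(patterns)) if scores[j] == best]
-- ===== Notes on version B (the rewrite author's own statement) =====
-- stated objective: alternative
-- what changed: Instead of comparing every answer against the three patterns, B builds a histogram of (position mod 40, answer) pairs in one pass (40 = lcm of the pattern lengths) and then reads each student's score off that 40-entry table without touching the answers again; max/tie selection is data-driven over a score list instead of three hardcoded branches.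
import Mathlib
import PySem

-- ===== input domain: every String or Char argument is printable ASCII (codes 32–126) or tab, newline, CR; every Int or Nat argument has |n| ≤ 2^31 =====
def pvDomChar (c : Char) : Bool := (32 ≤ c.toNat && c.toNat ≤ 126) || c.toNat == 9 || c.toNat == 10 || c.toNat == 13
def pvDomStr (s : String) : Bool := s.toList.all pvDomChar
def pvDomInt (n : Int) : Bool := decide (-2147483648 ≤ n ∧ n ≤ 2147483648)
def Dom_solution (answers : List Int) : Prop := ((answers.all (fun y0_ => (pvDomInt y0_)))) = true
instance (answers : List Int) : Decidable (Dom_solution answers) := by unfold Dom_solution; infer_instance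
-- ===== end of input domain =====

-- B replaces A's pattern-vs-answer comparison loop by a (position mod 40, answer)
-- histogram built in one pass, with each student's score then read off the 40-entry
-- table; same O(n) cost, equal return values (objective: alternative algorithm).

-- ===== PORT A =====
-- A: one pass over answer indices, three accumulators, then three fixed membership ifs.
def solution (answers : List Int) : List Int :=
  let student1 : List Int := [1, 2, 3, 4, 5]
  let student2 : List Int := [2, 1, 2, 3, 2, 4, 2, 5]
  let student3 : List Int := [3, 3, 1, 1, 2, 2, 4, 4, 5, 5]
  -- indices i and i % len(studentk) are always in range, so pyGetD is exact here
  let c := (PySem.List.pyRange 0 (PySem.List.len answers) 1).foldl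
    (fun (c : Int × Int × Int) i =>
      let c1 := if PySem.List.pyGetD student1 (PySem.Int.mod i (PySem.List.len student1)) 0
                   = PySem.List.pyGetD answers i 0 then c.1 + 1 else c.1
      let c2 := if PySem.List.pyGetD student2 (PySem.Int.mod i (PySem.List.len student2)) 0
                   = PySem.List.pyGetD answers i 0 then c.2.1 + 1 else c.2.1
      let c3 := if PySem.List.pyGetD student3 (PySem.Int.mod i (PySem.List.len student3)) 0
                   = PySem.List.pyGetD answers i 0 then c.2.2 + 1 else c.2.2
      (c1, c2, c3)) ((0 : Int), (0 : Int), (0 : Int))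
  let maxScore := max (max c.1 c.2.1) c.2.2
  (if c.1 = maxScore then [1] else [])
    ++ (if c.2.1 = maxScore then [2] else [])
    ++ (if c.2.2 = maxScore then [3] else [])

-- ===== PORT B =====
-- B: histogram of (i % 40, answers[i]) pairs; freq[key] = freq.get(key, 0) + 1
def pvFreq (answers : List Int) : PySem.Dict (Int × Int) Int :=
  (PySem.List.enumerate answers 0).foldl
    (fun (d : PySem.Dict (Int × Int) Int) ia =>
      let key := (PySem.Int.mod ia.1 40, ia.2)
      d.insert key (d.getD key 0 + 1)) PySem.Dict.empty

def solution_alt (answers : List Int) : List Int :=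
  let freq := pvFreq answers
  let patterns : List (List Int) :=
    [[1, 2, 3, 4, 5], [2, 1, 2, 3, 2, 4, 2, 5], [3, 3, 1, 1, 2, 2, 4, 4, 5, 5]]
  -- sum(freq.get((r, pat[r % len(pat)]), 0) for r in range(PERIOD))
  let scores := patterns.map (fun pat =>
    ((PySem.List.pyRange 0 40 1).map (fun r =>
        freq.getD (r, PySem.List.pyGetD pat (PySem.Int.mod r (PySem.List.len pat)) 0) 0)).sum)
  -- max(scores): scores has 3 elements, never empty, so getD's default is unreachable
  let best := (PySem.List.max? scores (fun x => x)).getD 0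
  ((PySem.List.pyRange 0 (PySem.List.len patterns) 1).filter
      (fun j => PySem.List.pyGetD scores j 0 == best)).map (fun j => j + 1)

-- ===== PRECONDITION & SPEC =====
def Spec_solution (answers : List Int) (out : List Int) : Prop := out = solution_alt answers
instance (answers : List Int) (out : List Int) : Decidable (Spec_solution answers out) := by unfold Spec_solution; infer_instance

-- ===== CLAIM (what is proved, stated in full; the proofs are below) =====
def Claim_equal_solution : Prop := ∀ (answers : List Int), Dom_solution answers → Spec_solution answers (solution answers)

-- ===== LEMMAS AND PROOFS =====

-- a fold with three independent 0/1 accumulators is three folds (foldl_prod_mk twice)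
theorem pv_foldl_triple (l : List Int) (p q r : Int → Prop)
    [DecidablePred p] [DecidablePred q] [DecidablePred r] :
    l.foldl (fun (c : Int × Int × Int) i =>
        (if p i then c.1 + 1 else c.1,
         if q i then c.2.1 + 1 else c.2.1,
         if r i then c.2.2 + 1 else c.2.2)) ((0 : Int), (0 : Int), (0 : Int))
      = (l.foldl (fun s i => if p i then s + 1 else s) 0,
         l.foldl (fun s i => if q i then s + 1 else s) 0,
         l.foldl (fun s i => if r i then s + 1 else s) 0) := by
  rw [PySem.List.foldl_prod_mk
        (f := fun s i => if p i then s + 1 else s)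
        (g := fun (s : Int × Int) i =>
          (if q i then s.1 + 1 else s.1, if r i then s.2 + 1 else s.2)),
      PySem.List.foldl_prod_mk (f := fun s i => if q i then s + 1 else s)
        (g := fun s i => if r i then s + 1 else s)]

-- summing one histogram cell per residue r ∈ [0, P) counts the pairs whose value
-- matches the table at their own residue (keys' first components all lie in [0, P))
theorem pv_sum_count (ks : List (Int × Int)) (g : Int → Int) (P : Int)
    (h : ∀ p ∈ ks, 0 ≤ p.1 ∧ p.1 < P) :
    ((PySem.List.pyRange 0 P 1).map (fun r => ((ks.count (r, g r) : Int)))).sum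
      = ((ks.countP (fun p => p.2 == g p.1) : Int)) := by
  induction ks with
  | nil => simp
  | cons p ks ih =>
    have hp := h p (List.mem_cons_self)
    have hks : ∀ q ∈ ks, 0 ≤ q.1 ∧ q.1 < P := fun q hq => h q (List.mem_cons_of_mem _ hq)
    have hcnt : ∀ r : Int, ((p :: ks).count (r, g r) : Int)
        = (ks.count (r, g r) : Int) + (if ((r, g r) == p) then (1 : Int) else 0) := by
      intro r
      rw [List.count_cons]
      rcases eq_or_ne ((r, g r)) p with he | he
      · simp [he]
      · simp [he, Ne.symm he]
    calc ((PySem.List.pyRange 0 P 1).map (fun r => ((p :: ks).count (r, g r) : Int))).sum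
        = ((PySem.List.pyRange 0 P 1).map (fun r =>
            (ks.count (r, g r) : Int) + (if ((r, g r) == p) then (1 : Int) else 0))).sum := by
          exact congrArg List.sum (List.map_congr_left (fun r _ => hcnt r))
      _ = ((PySem.List.pyRange 0 P 1).map (fun r => (ks.count (r, g r) : Int))).sum
            + ((PySem.List.pyRange 0 P 1).map
                (fun r => if ((r, g r) == p) then (1 : Int) else 0)).sum := by
          exact PySem.List.sum_map_add_int _ _ _
      _ = ((ks.countP (fun p => p.2 == g p.1) : Int))
            + (((PySem.List.pyRange 0 P 1).countP (fun r => (r, g r) == p) : Int)) := by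
          rw [ih hks, PySem.List.sum_map_ite_one_zero]
      _ = (((p :: ks).countP (fun p => p.2 == g p.1) : Int)) := by
          rw [List.countP_cons]
          by_cases hv : p.2 = g p.1
          · have : (PySem.List.pyRange 0 P 1).countP (fun r => (r, g r) == p) = 1 := by
              have : (fun r => (r, g r) == p) = (fun r => r == p.1) := by
                funext r
                by_cases hr : r = p.1
                · subst hr; simp [hv.symm]
                · simp [Prod.ext_iff, hr]
              rw [this, ← List.count_eq_countP]
              exact List.count_eq_one_of_mem (PySem.List.nodup_pyRange_one 0 P)
                (PySem.List.mem_pyRange_one.mpr hp)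
            simp [this, hv]
          · have : (PySem.List.pyRange 0 P 1).countP (fun r => (r, g r) == p) = 0 := by
              apply List.countP_eq_zero.mpr
              intro r _
              simp only [beq_iff_eq]
              intro hr
              exact hv (by rw [← hr])
            simp [this, hv]

-- one student's table-read score equals A's per-index match count, for any pattern
-- whose length divides the period 40
theorem pv_score_eq (answers pat : List Int) (hdvd : (PySem.List.len pat) ∣ 40) :
    ((PySem.List.pyRange 0 40 1).map (fun r =>
        (pvFreq answers).getD
          (r, PySem.List.pyGetD pat (PySem.Int.mod r (PySem.List.len pat)) 0) 0)).sum
      = (PySem.List.pyRange 0 (PySem.List.len answers) 1).foldl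
          (fun s i =>
            if PySem.List.pyGetD pat (PySem.Int.mod i (PySem.List.len pat)) 0
               = PySem.List.pyGetD answers i 0 then s + 1 else s) 0 := by
  set L := PySem.List.len pat with hL
  have hLpos : 0 < L := by
    rcases hdvd with ⟨c, hc⟩
    have : L ≠ 0 := by intro h0; rw [h0] at hc; omega
    have : 0 ≤ L := by simp [hL, PySem.List.len]
    omega
  set g : Int → Int := fun r => PySem.List.pyGetD pat (PySem.Int.mod r L) 0 with hg
  set ks : List (Int × Int) :=
    (PySem.List.enumerate answers 0).map (fun ia => (PySem.Int.mod ia.1 40, ia.2)) with hks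
  -- the histogram fold is a key-counting fold over ks
  have hfreq : ∀ v, (pvFreq answers).getD v 0 = (ks.count v : Int) := by
    intro v
    have : pvFreq answers
        = ks.foldl (fun d k => d.insert k (d.getD k 0 + 1)) PySem.Dict.empty := by
      rw [hks, List.foldl_map]; rfl
    rw [this, PySem.Dict.getD_foldl_insert_add_one]
    simp
  have hmem : ∀ p ∈ ks, 0 ≤ p.1 ∧ p.1 < 40 := by
    intro p hp
    rw [hks] at hp
    rcases List.mem_map.mp hp with ⟨ia, _, hia⟩
    subst hia
    exact ⟨PySem.Int.mod_nonneg _ (by omega), PySem.Int.mod_lt _ (by omega)⟩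
  calc ((PySem.List.pyRange 0 40 1).map (fun r => (pvFreq answers).getD (r, g r) 0)).sum
      = ((PySem.List.pyRange 0 40 1).map (fun r => (ks.count (r, g r) : Int))).sum := by
        exact congrArg List.sum (List.map_congr_left (fun r _ => by rw [hfreq]))
    _ = ((ks.countP (fun p => p.2 == g p.1) : Int)) := pv_sum_count ks g 40 hmem
    _ = (((PySem.List.pyRange 0 (PySem.List.len answers) 1).countP
          (fun i => PySem.List.pyGetD answers i 0 == g (PySem.Int.mod i 40)) : Int)) := by
        rw [hks, List.countP_map, PySem.List.enumerate_eq_map_pyRange answers 0,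
          List.countP_map]
        rfl
    _ = (PySem.List.pyRange 0 (PySem.List.len answers) 1).foldl
          (fun s i => if g i = PySem.List.pyGetD answers i 0 then s + 1 else s) 0 := by
        have hfold := PySem.List.foldl_count_if
          (fun i => decide (g i = PySem.List.pyGetD answers i 0))
          (PySem.List.pyRange 0 (PySem.List.len answers) 1) 0
        simp only [decide_eq_true_eq, zero_add] at hfold
        rw [hfold]
        congr 1
        apply List.countP_congr
        intro i _
        -- g (i % 40) = g i since len pat divides 40 (mod-of-mod), plus == symmetry
        have hmm : PySem.Int.mod (PySem.Int.mod i 40) L = PySem.Int.mod i L := by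
          rw [PySem.Int.mod_eq_emod_of_pos (by omega : (0:Int) < 40),
              PySem.Int.mod_eq_emod_of_pos hLpos,
              PySem.Int.mod_eq_emod_of_pos hLpos]
          exact Int.emod_emod_of_dvd i hdvd
        have hgm : g (PySem.Int.mod i 40) = g i := by
          show PySem.List.pyGetD pat (PySem.Int.mod (PySem.Int.mod i 40) L) 0
              = PySem.List.pyGetD pat (PySem.Int.mod i L) 0
          rw [hmm]
        simp only [hgm, beq_iff_eq, decide_eq_true_eq]
        exact eq_comm

-- the two tails agree once the three counts c1 c2 c3 are abstracted
theorem pv_tail_eq (c1 c2 c3 : Int) :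
    (if c1 = max (max c1 c2) c3 then [1] else [])
      ++ (if c2 = max (max c1 c2) c3 then [2] else [])
      ++ (if c3 = max (max c1 c2) c3 then [3] else [])
    = ((PySem.List.pyRange 0 (PySem.List.len [[(1:Int), 2, 3, 4, 5], [2, 1, 2, 3, 2, 4, 2, 5], [3, 3, 1, 1, 2, 2, 4, 4, 5, 5]]) 1).filter
        (fun j => PySem.List.pyGetD [c1, c2, c3] j 0
            == (PySem.List.max? [c1, c2, c3] (fun x => x)).getD 0)).map (fun j => j + 1) := by
  have hr : PySem.List.pyRange 0 (PySem.List.len [[(1:Int), 2, 3, 4, 5], [2, 1, 2, 3, 2, 4, 2, 5], [3, 3, 1, 1, 2, 2, 4, 4, 5, 5]]) 1 = [0, 1, 2] := by decide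
  have hm : (PySem.List.max? [c1, c2, c3] (fun x => x)).getD 0 = max (max c1 c2) c3 := by
    rw [PySem.List.max?_id_cons]
    simp only [List.foldl_cons, List.foldl_nil, Option.getD_some]
  have h0 : ∀ a b c : Int, PySem.List.pyGetD [a, b, c] (0 : Int) 0 = a := fun a b c => by
    rw [PySem.List.pyGetD_ofNat' [a, b, c] 0]; rfl
  have h1 : ∀ a b c : Int, PySem.List.pyGetD [a, b, c] (1 : Int) 0 = b := fun a b c => by
    rw [PySem.List.pyGetD_ofNat' [a, b, c] 1]; rfl
  have h2 : ∀ a b c : Int, PySem.List.pyGetD [a, b, c] (2 : Int) 0 = c := fun a b c => by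
    rw [PySem.List.pyGetD_ofNat' [a, b, c] 2]; rfl
  rw [hr, hm]
  generalize max (max c1 c2) c3 = M
  by_cases hA : c1 = M <;> by_cases hB : c2 = M <;> by_cases hC : c3 = M <;>
    simp [h0, h1, h2, hA, hB, hC]

theorem solution_eq_alt (answers : List Int) : solution answers = solution_alt answers := by
  simp only [solution, solution_alt, List.map_cons, List.map_nil]
  rw [pv_foldl_triple]
  rw [← pv_score_eq answers [1, 2, 3, 4, 5] (by decide),
      ← pv_score_eq answers [2, 1, 2, 3, 2, 4, 2, 5] (by decide),
      ← pv_score_eq answers [3, 3, 1, 1, 2, 2, 4, 4, 5, 5] (by decide)]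
  exact pv_tail_eq _ _ _

-- ===== VERDICT (by name: the statement is the Claim_ definition above) =====
theorem solution_spec : Claim_equal_solution := by
  intro answers _
  unfold Spec_solution
  exact solution_eq_alt answers
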